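-- pv_equiv track=rewrite | github.com/UNIST-LOFT/GreyboxAPR | SRepair/Study/src/apr_prompt.py | get_example_bugs
-- ===== SOURCE A (Python) =====
-- def get_example_bugs(bugs, curr_bug):
--     curr_proj_example_lst = []
--     other_proj_example_lst = []
--     project = curr_bug.split("-")[0]
--     for file_name, bug in bugs.items():
--         if file_name == curr_bug:
--             continue
--         if file_name.startswith(project + "-"):
--             curr_proj_example_lst.append((len(bug['buggy']) + len(bug['fix']), file_name))
--         else:
--             other_proj_example_lst.append((len(bug['buggy']) + len(bug['fix']), file_name))
--     curr_proj_example_lst.sort(key=lambda x: x[0])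
--     other_proj_example_lst.sort(key=lambda x: x[0])
--
--     curr_proj_file_names = [item[1] for item in curr_proj_example_lst]
--     other_proj_file_names = [item[1] for item in other_proj_example_lst]
--     example_bug_lst = curr_proj_file_names + other_proj_file_names
--
--     return example_bug_lst
-- ===== SOURCE B (Python) =====
-- def get_example_bugs(bugs, curr_bug):
--     project = curr_bug.split("-")[0]
--     prefix = project + "-"
--     curr_buckets = {}
--     other_buckets = {}
--     for file_name, bug in bugs.items():
--         if file_name == curr_bug:
--             continue
--         size = len(bug['buggy']) + len(bug['fix'])
--         buckets = curr_buckets if file_name.startswith(prefix) else other_buckets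
--         buckets.setdefault(size, []).append(file_name)
--     result = []
--     for size in sorted(curr_buckets):
--         result.extend(curr_buckets[size])
--     for size in sorted(other_buckets):
--         result.extend(other_buckets[size])
--     return result
-- ===== Notes on version B (the rewrite author's own statement) =====
-- stated objective: alternative
-- what changed: B never sorts the entries: it groups names into dicts keyed by size (bucket lists, setdefault+append) in one pass and emits buckets in increasing order of the sorted DISTINCT sizes, instead of A's two stable sorts of (size, name) pair lists.
import Mathlib
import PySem

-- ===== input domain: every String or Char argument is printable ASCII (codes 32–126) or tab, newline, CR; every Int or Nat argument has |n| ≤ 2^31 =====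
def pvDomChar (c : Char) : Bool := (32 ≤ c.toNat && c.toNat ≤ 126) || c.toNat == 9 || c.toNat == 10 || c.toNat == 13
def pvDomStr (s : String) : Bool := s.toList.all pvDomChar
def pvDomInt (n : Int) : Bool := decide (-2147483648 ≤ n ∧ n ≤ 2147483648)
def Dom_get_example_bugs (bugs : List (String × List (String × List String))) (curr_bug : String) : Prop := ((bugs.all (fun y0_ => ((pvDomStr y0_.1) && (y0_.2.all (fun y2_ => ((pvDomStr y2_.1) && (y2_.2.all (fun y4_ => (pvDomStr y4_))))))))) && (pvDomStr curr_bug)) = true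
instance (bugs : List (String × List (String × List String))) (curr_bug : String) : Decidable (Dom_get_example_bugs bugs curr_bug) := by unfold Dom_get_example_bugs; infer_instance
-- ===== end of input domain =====

-- B groups entries into dicts keyed by size (bucket lists of names) and sorts only the DISTINCT
-- sizes, concatenating buckets in increasing-size order, instead of A's two stable sorts of
-- (size, name) pair lists; same results, similar cost (objective: alternative).


-- ===== PORT A =====
-- literal port of A: one pass partitioning entries (skipping curr_bug) into two (size, name)
-- lists, then sorting EACH stably by size, then concatenating the name projections.
-- bug['buggy'] / bug['fix'] raise KeyError when absent; Pre_ excludes that, so getD [] is never hit.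
def get_example_bugs (bugs : List (String × List (String × List String))) (curr_bug : String) : List String :=
  -- curr_bug.split("-")[0]: split on nonempty "-" is always `some` and nonempty, defaults unreachable
  let project : String := ((PySem.Str.split? curr_bug "-").getD []).headD ""
  let pair :=
    bugs.foldl (fun (acc : List (Int × String) × List (Int × String)) fb =>
      if fb.1 == curr_bug then acc
      else if PySem.Str.startswith fb.1 (project ++ "-") then
        (acc.1 ++ [(((((PySem.Dict.get? ⟨fb.2⟩ "buggy").getD []).length : Int) + (((PySem.Dict.get? ⟨fb.2⟩ "fix").getD []).length : Int)), fb.1)], acc.2)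
      else
        (acc.1, acc.2 ++ [(((((PySem.Dict.get? ⟨fb.2⟩ "buggy").getD []).length : Int) + (((PySem.Dict.get? ⟨fb.2⟩ "fix").getD []).length : Int)), fb.1)])) ([], [])
  let curr_sorted := PySem.List.sorted pair.1 (fun x => x.1)
  let other_sorted := PySem.List.sorted pair.2 (fun x => x.1)
  curr_sorted.map (fun x => x.2) ++ other_sorted.map (fun x => x.2)

-- ===== PORT B =====
-- port of Source B: one pass putting each name into the size-keyed bucket dict of its partition
-- (setdefault(size, []).append(name) = Dict.modify size [] (· ++ [name])), then for each dict
-- its buckets are emitted in increasing order of the DISTINCT sizes (sorted(dict) sorts keys).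
-- curr_buckets[size] cannot raise: size is drawn from the dict's own keys, so getD [] is exact.
def get_example_bugs_alt (bugs : List (String × List (String × List String))) (curr_bug : String) : List String :=
  let project : String := ((PySem.Str.split? curr_bug "-").getD []).headD ""
  let pfx := project ++ "-"
  let ds :=
    bugs.foldl (fun (acc : PySem.Dict Int (List String) × PySem.Dict Int (List String)) fb =>
      if fb.1 == curr_bug then acc
      else
        let size : Int := (((PySem.Dict.get? ⟨fb.2⟩ "buggy").getD []).length : Int) + (((PySem.Dict.get? ⟨fb.2⟩ "fix").getD []).length : Int)
        if PySem.Str.startswith fb.1 pfx then (acc.1.modify size [] (· ++ [fb.1]), acc.2)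
        else (acc.1, acc.2.modify size [] (· ++ [fb.1]))) (PySem.Dict.empty, PySem.Dict.empty)
  (PySem.List.sorted ds.1.keys (fun k => k)).flatMap (fun k => ds.1.getD k []) ++
  (PySem.List.sorted ds.2.keys (fun k => k)).flatMap (fun k => ds.2.getD k [])

-- ===== PRECONDITION & SPEC =====
-- Pre_ excludes (a) entries other than curr_bug whose dict lacks a 'buggy' or 'fix' key — there
-- Python A raises KeyError — and (b) assoc lists with duplicate keys (outer or inner), which a
-- Python dict cannot represent.
def Pre_get_example_bugs (bugs : List (String × List (String × List String))) (curr_bug : String) : Prop :=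
  (bugs.map Prod.fst).Nodup ∧
  ∀ fb ∈ bugs, (fb.2.map Prod.fst).Nodup ∧
    (fb.1 ≠ curr_bug → "buggy" ∈ fb.2.map Prod.fst ∧ "fix" ∈ fb.2.map Prod.fst)
instance (bugs : List (String × List (String × List String))) (curr_bug : String) : Decidable (Pre_get_example_bugs bugs curr_bug) := by unfold Pre_get_example_bugs; infer_instance

def pvWitness_get_example_bugs : (List (String × List (String × List String))) × String :=
  ([("p-1", [("buggy", ["a"]), ("fix", [])]), ("q-1", [("buggy", []), ("fix", ["b", "c"])])], "p-2")

def Spec_get_example_bugs (bugs : List (String × List (String × List String))) (curr_bug : String) (out : List String) : Prop := out = get_example_bugs_alt bugs curr_bug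
instance (bugs : List (String × List (String × List String))) (curr_bug : String) (out : List String) : Decidable (Spec_get_example_bugs bugs curr_bug out) := by unfold Spec_get_example_bugs; infer_instance

-- ===== CLAIM (what is proved, stated in full; the proofs are below) =====
def Claim_equal_get_example_bugs : Prop := ∀ (bugs : List (String × List (String × List String))) (curr_bug : String), Dom_get_example_bugs bugs curr_bug → Pre_get_example_bugs bugs curr_bug → Spec_get_example_bugs bugs curr_bug (get_example_bugs bugs curr_bug)

-- ===== LEMMAS AND PROOFS =====

-- inserting an element that goes before everything in the list puts it at the head
theorem insertBy_of_forall (before : (Int × String) → (Int × String) → Bool) (x : Int × String)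
    (l : List (Int × String)) (h : ∀ z ∈ l, before x z = true) :
    PySem.List.insertBy before x l = x :: l := by
  cases l with
  | nil => simp [PySem.List.insertBy]
  | cons y ys => simp [PySem.List.insertBy, h y (by simp)]

-- a stable insertion into a key-sorted list commutes with filtering
theorem filter_insertBy (key : (Int × String) → Int) (q : (Int × String) → Bool)
    (x : Int × String) (ys : List (Int × String))
    (hys : ys.Pairwise (fun a b => key a ≤ key b)) :
    (PySem.List.insertBy (fun a b => decide (key a < key b)) x ys).filter q
      = if q x then PySem.List.insertBy (fun a b => decide (key a < key b)) x (ys.filter q)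
        else ys.filter q := by
  induction ys with
  | nil => by_cases hx : q x <;> simp [PySem.List.insertBy, hx]
  | cons y ys ih =>
    rw [List.pairwise_cons] at hys
    by_cases hlt : key x < key y
    · simp only [PySem.List.insertBy, hlt, decide_true, if_true]
      by_cases hx : q x
      · rw [if_pos hx]
        rw [insertBy_of_forall _ x (((y :: ys).filter q)) ?_]
        · simp [hx]
        · intro z hz
          have hz' := List.mem_of_mem_filter hz
          simp only [decide_eq_true_eq]
          rcases List.mem_cons.mp hz' with h | h
          · exact h ▸ hlt
          · exact lt_of_lt_of_le hlt (hys.1 z h)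
      · simp [hx]
    · simp only [PySem.List.insertBy, hlt, decide_false, Bool.false_eq_true, if_false]
      by_cases hy : q y
      · simp only [List.filter_cons, hy, if_true]
        rw [ih hys.2]
        by_cases hx : q x
        · rw [if_pos hx, if_pos hx]
          simp [PySem.List.insertBy, hlt]
        · rw [if_neg hx, if_neg hx]
      · simp only [List.filter_cons, hy, Bool.false_eq_true, if_false]
        rw [ih hys.2]

-- filtering commutes with Python's stable sort
theorem filter_sorted (key : (Int × String) → Int) (q : (Int × String) → Bool)
    (xs : List (Int × String)) :
    (PySem.List.sorted xs key).filter q = PySem.List.sorted (xs.filter q) key := by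
  induction xs using List.reverseRecOn with
  | nil => simp [PySem.List.sorted_eq_foldl_insertBy]
  | append_singleton xs x ih =>
    have hstep : ∀ (l : List (Int × String)), PySem.List.sorted (l ++ [x]) key
        = PySem.List.insertBy (fun a b => decide (key a < key b)) x (PySem.List.sorted l key) := by
      intro l
      rw [PySem.List.sorted_eq_foldl_insertBy, PySem.List.sorted_eq_foldl_insertBy, List.foldl_append]
      rfl
    rw [hstep, filter_insertBy key q x _ (PySem.List.sorted_pairwise xs key), ih]
    by_cases hx : q x
    · have h1 : List.filter q [x] = [x] := by simp [hx]
      rw [if_pos hx, List.filter_append, h1, hstep]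
    · have h1 : List.filter q [x] = [] := by simp [hx]
      rw [if_neg hx, List.filter_append, h1, List.append_nil]

-- A's loop: partitions the non-curr entries, in order, by the name predicate
theorem loopA (curr : String) (p : String → Bool) (sz : List (String × List String) → Int) :
    ∀ (l : List (String × List (String × List String))) (c o : List (Int × String)),
    l.foldl (fun acc fb =>
        if fb.1 == curr then acc
        else if p fb.1 then (acc.1 ++ [(sz fb.2, fb.1)], acc.2)
        else (acc.1, acc.2 ++ [(sz fb.2, fb.1)])) (c, o)
      = (c ++ ((l.filter (fun fb => !(fb.1 == curr))).map (fun fb => (sz fb.2, fb.1))).filter (fun t => p t.2),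
         o ++ ((l.filter (fun fb => !(fb.1 == curr))).map (fun fb => (sz fb.2, fb.1))).filter (fun t => !(p t.2))) := by
  intro l
  induction l with
  | nil => simp
  | cons fb l ih =>
    intro c o
    rw [List.foldl_cons]
    by_cases hc : (fb.1 == curr) = true
    · rw [if_pos hc, ih]
      simp [hc]
    · rw [if_neg hc]
      by_cases hp : p fb.1
      · rw [if_pos hp, ih]
        simp [hc, hp]
      · rw [if_neg hp, ih]
        simp [hc, hp]

-- B's loop: builds, for each partition, the bucket dict of the SAME (size, name) sequence
theorem loopB (curr : String) (p : String → Bool) (sz : List (String × List String) → Int) :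
    ∀ (l : List (String × List (String × List String)))
      (d1 d2 : PySem.Dict Int (List String)),
    l.foldl (fun (acc : PySem.Dict Int (List String) × PySem.Dict Int (List String)) fb =>
        if fb.1 == curr then acc
        else if p fb.1 then (acc.1.modify (sz fb.2) [] (· ++ [fb.1]), acc.2)
        else (acc.1, acc.2.modify (sz fb.2) [] (· ++ [fb.1]))) (d1, d2)
      = ((((l.filter (fun fb => !(fb.1 == curr))).map (fun fb => (sz fb.2, fb.1))).filter (fun t => p t.2)).foldl
            (fun d t => d.modify t.1 [] (· ++ [t.2])) d1,
         (((l.filter (fun fb => !(fb.1 == curr))).map (fun fb => (sz fb.2, fb.1))).filter (fun t => !(p t.2))).foldl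
            (fun d t => d.modify t.1 [] (· ++ [t.2])) d2) := by
  intro l
  induction l with
  | nil => simp
  | cons fb l ih =>
    intro d1 d2
    rw [List.foldl_cons]
    by_cases hc : (fb.1 == curr) = true
    · rw [if_pos hc, ih]
      simp [hc]
    · rw [if_neg hc]
      by_cases hp : p fb.1
      · rw [if_pos hp, ih]
        simp [hc, hp]
      · rw [if_neg hp, ih]
        simp [hc, hp]

-- flatMap of the key-blocks of a key-sorted list, over strictly increasing keys covering it,
-- reassembles the list
theorem flat_blocks :
    ∀ (s : List (Int × String)) (ks : List Int),
    ks.Pairwise (· < ·) →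
    s.Pairwise (fun a b => a.1 ≤ b.1) →
    (∀ q ∈ s, q.1 ∈ ks) →
    ks.flatMap (fun k => (s.filter (fun t => t.1 == k)).map (fun t => t.2))
      = s.map (fun t => t.2) := by
  intro s
  induction s with
  | nil =>
    intro ks _ _ _
    simp
  | cons x s' ih =>
    intro ks hks hs hmem
    obtain ⟨a, b, rfl⟩ := List.append_of_mem (hmem x (by simp))
    rw [List.pairwise_append] at hks
    obtain ⟨hka, hkb, hab⟩ := hks
    rw [List.pairwise_cons] at hs
    obtain ⟨hxle, hs'⟩ := hs
    have ha_lt : ∀ y ∈ a, y < x.1 := fun y hy => hab y hy x.1 (by simp)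
    have hb_gt : ∀ k ∈ b, x.1 < k := (List.pairwise_cons.mp hkb).1
    rw [List.flatMap_append]
    have h1 : a.flatMap (fun k => ((x :: s').filter (fun t => t.1 == k)).map (fun t => t.2)) = [] := by
      rw [List.flatMap_eq_nil_iff]
      intro k hk
      have hf : (x :: s').filter (fun t => t.1 == k) = [] := by
        rw [List.filter_eq_nil_iff]
        intro t ht
        rcases List.mem_cons.mp ht with rfl | ht'
        · simp only [beq_iff_eq]
          exact fun h => absurd (h ▸ ha_lt k hk) (lt_irrefl _)
        · simp only [beq_iff_eq]
          intro h
          exact absurd (lt_of_lt_of_le (ha_lt k hk) (hxle t ht')) (h ▸ lt_irrefl _)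
      rw [hf]
      simp
    rw [h1, List.nil_append, List.flatMap_cons]
    have hblk : (x :: s').filter (fun t => t.1 == x.1) = x :: s'.filter (fun t => t.1 == x.1) := by
      simp
    have hb_blocks : b.flatMap (fun k => ((x :: s').filter (fun t => t.1 == k)).map (fun t => t.2))
        = b.flatMap (fun k => (s'.filter (fun t => t.1 == k)).map (fun t => t.2)) := by
      apply List.flatMap_congr
      intro k hk
      have : (x :: s').filter (fun t => t.1 == k) = s'.filter (fun t => t.1 == k) := by
        rw [List.filter_cons]
        have : (x.1 == k) = false := by
          simp only [beq_eq_false_iff_ne]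
          exact fun h => absurd (h ▸ hb_gt k hk) (lt_irrefl _)
        simp [this]
      rw [this]
    rw [hblk, hb_blocks, List.map_cons, List.cons_append]
    congr 1
    have : (x.1 :: b).flatMap (fun k => (s'.filter (fun t => t.1 == k)).map (fun t => t.2))
        = s'.map (fun t => t.2) := by
      apply ih (x.1 :: b) hkb hs'
      intro q hq
      rcases List.mem_append.mp (hmem q (List.mem_cons_of_mem _ hq)) with h | h
      · exact absurd (lt_of_lt_of_le (ha_lt _ h) (hxle q hq)) (lt_irrefl _)
      · exact h
    rw [← this, List.flatMap_cons]

-- a block (all keys equal) is unchanged by the stable sort, so blocks of the sorted list are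
-- the blocks of the original list
theorem filter_key_sorted (l : List (Int × String)) (k : Int) :
    (PySem.List.sorted l (fun t => t.1)).filter (fun t => t.1 == k)
      = l.filter (fun t => t.1 == k) := by
  rw [filter_sorted]
  apply PySem.List.sorted_eq_self_of_pairwise
  apply List.pairwise_of_forall_mem_list
  intro p hp q hq
  have hp1 : p.1 = k := by simpa using (List.mem_filter.mp hp).2
  have hq1 : q.1 = k := by simpa using (List.mem_filter.mp hq).2
  simp [hp1, hq1]

-- the bucket output of one partition equals the stable-sort-then-project output
theorem flat_buckets (l : List (Int × String)) :
    (PySem.List.sorted (PySem.Set.ofList (l.map Prod.fst)) (fun k => k)).flatMap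
        (fun k => (l.filter (fun t => t.1 == k)).map (fun t => t.2))
      = (PySem.List.sorted l (fun t => t.1)).map (fun t => t.2) := by
  have hcongr : ∀ k, l.filter (fun t => t.1 == k)
      = (PySem.List.sorted l (fun t => t.1)).filter (fun t => t.1 == k) :=
    fun k => (filter_key_sorted l k).symm
  calc (PySem.List.sorted (PySem.Set.ofList (l.map Prod.fst)) (fun k => k)).flatMap
        (fun k => (l.filter (fun t => t.1 == k)).map (fun t => t.2))
      = (PySem.List.sorted (PySem.Set.ofList (l.map Prod.fst)) (fun k => k)).flatMap
        (fun k => ((PySem.List.sorted l (fun t => t.1)).filter (fun t => t.1 == k)).map (fun t => t.2)) := by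
        apply List.flatMap_congr
        intro k _
        rw [hcongr k]
    _ = (PySem.List.sorted l (fun t => t.1)).map (fun t => t.2) := by
        apply flat_blocks
        · exact PySem.List.sorted_ofList_pairwise_lt _
        · exact PySem.List.sorted_pairwise l _
        · intro q hq
          rw [PySem.List.mem_sorted, PySem.Set.mem_ofList]
          exact List.mem_map.mpr ⟨q, (PySem.List.mem_sorted _ _ _ _).mp hq, rfl⟩

-- keys of a bucket-building fold from the empty dict: the distinct keys, first occurrences first
theorem keys_buckets (l : List (Int × String)) :
    (l.foldl (fun (d : PySem.Dict Int (List String)) t => d.modify t.1 [] (· ++ [t.2]))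
        PySem.Dict.empty).keys = PySem.Set.ofList (l.map Prod.fst) := by
  have h := PySem.Dict.keys_foldl_modify_key l Prod.fst [] (fun _ t => (· ++ [t.2])) PySem.Dict.empty
  rw [h]
  simp [PySem.Dict.keys_empty, PySem.Set.update, PySem.Set.ofList]

-- ===== VERDICT (by name: the statement is the Claim_ definition above) =====
theorem get_example_bugs_spec : Claim_equal_get_example_bugs := by
  intro bugs curr_bug _ _
  unfold Spec_get_example_bugs get_example_bugs get_example_bugs_alt
  simp only
  rw [loopA curr_bug
        (fun s => PySem.Str.startswith s ((((PySem.Str.split? curr_bug "-").getD []).headD "") ++ "-"))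
        (fun b => (((PySem.Dict.get? ⟨b⟩ "buggy").getD []).length : Int) + (((PySem.Dict.get? ⟨b⟩ "fix").getD []).length : Int))
        bugs [] [],
      loopB curr_bug
        (fun s => PySem.Str.startswith s ((((PySem.Str.split? curr_bug "-").getD []).headD "") ++ "-"))
        (fun b => (((PySem.Dict.get? ⟨b⟩ "buggy").getD []).length : Int) + (((PySem.Dict.get? ⟨b⟩ "fix").getD []).length : Int))
        bugs PySem.Dict.empty PySem.Dict.empty]
  simp only [List.nil_append]
  congr 1
  all_goals {
    rw [keys_buckets, ← flat_buckets]
    apply List.flatMap_congr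
    intro k _
    rw [PySem.Dict.getD_foldl_modify_append, PySem.Dict.getD_empty, List.nil_append]
  }
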